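-- pv_equiv track=rewrite | github.com/rpmartz/paoc | aoc/y24/day04.py | generate_offsets
-- ===== SOURCE A (Python) =====
-- def generate_offsets(i, j):
--     directions = [
--         # horizontal right
--         [(0, 0), (0, 1), (0, 2), (0, 3)],
--         # horizontal left
--         [(0, 0), (0, -1), (0, -2), (0, -3)],
--         # vertical down
--         [(0, 0), (1, 0), (2, 0), (3, 0)],
--         # vertical up
--         [(0, 0), (-1, 0), (-2, 0), (-3, 0)],
--         # diagonal upward right
--         [(0, 0), (1, -1), (2, -2), (3, -3)],
--         # diagonal downward right
--         [(0, 0), (1, 1), (2, 2), (3, 3)],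
--         # diagonal upward left
--         [(0, 0), (-1, -1), (-2, -2), (-3, -3)],
--         # diagonal downward left
--         [(0, 0), (-1, 1), (-2, 2), (-3, 3)],
--     ]
--
--     offset_coords = []
--     for direction in directions:
--         offset_coords.append([(i + di, j + dj) for di, dj in direction])
--     return offset_coords
-- ===== SOURCE B (Python) =====
-- def generate_offsets(i, j):
--     dirs = [(0, 1), (0, -1), (1, 0), (-1, 0), (1, -1), (1, 1), (-1, -1), (-1, 1)]
--     # Build 4 "rings": ring k holds, for each of the 8 directions, the point k
--     # steps out from (i, j), obtained by repeated vector addition (no table, no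
--     # scaling).  The answer is the transpose of the rings.
--     ring = [(i, j)] * 8
--     rings = []
--     for _ in range(4):
--         rings.append(ring)
--         ring = [(x + dx, y + dy) for (x, y), (dx, dy) in zip(ring, dirs)]
--     return [list(row) for row in zip(*rings)]
-- ===== Notes on version B (the rewrite author's own statement) =====
-- stated objective: alternative
-- what changed: B has no offset table: it builds 4 distance-rings by repeated vector addition of the 8 unit directions to the whole previous ring, then transposes (zip*) the rings into per-direction rows.
import Mathlib
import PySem

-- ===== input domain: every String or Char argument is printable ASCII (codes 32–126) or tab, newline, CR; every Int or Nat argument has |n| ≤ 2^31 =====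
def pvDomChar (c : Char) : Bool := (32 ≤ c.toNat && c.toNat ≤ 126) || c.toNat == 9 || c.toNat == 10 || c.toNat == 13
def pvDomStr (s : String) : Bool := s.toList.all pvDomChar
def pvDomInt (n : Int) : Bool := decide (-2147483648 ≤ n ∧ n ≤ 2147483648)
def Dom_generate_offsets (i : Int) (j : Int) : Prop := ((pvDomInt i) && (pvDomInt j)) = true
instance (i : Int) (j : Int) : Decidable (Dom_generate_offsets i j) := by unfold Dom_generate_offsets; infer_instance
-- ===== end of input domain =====

-- B drops A's 32-entry offset table: it grows 4 distance-rings by repeated vector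
-- addition of the unit directions and transposes them into rows (alternative shape).

-- ===== PORT A =====
def generate_offsets (i : Int) (j : Int) : List (List (Int × Int)) :=
  let directions : List (List (Int × Int)) := [
    [(0, 0), (0, 1), (0, 2), (0, 3)],
    [(0, 0), (0, -1), (0, -2), (0, -3)],
    [(0, 0), (1, 0), (2, 0), (3, 0)],
    [(0, 0), (-1, 0), (-2, 0), (-3, 0)],
    [(0, 0), (1, -1), (2, -2), (3, -3)],
    [(0, 0), (1, 1), (2, 2), (3, 3)],
    [(0, 0), (-1, -1), (-2, -2), (-3, -3)],
    [(0, 0), (-1, 1), (-2, 2), (-3, 3)]]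
  directions.foldl (fun offset_coords direction =>
    offset_coords ++ [direction.map (fun (d : Int × Int) => (i + d.1, j + d.2))]) []

-- ===== PORT B =====
-- zip(*rows): take heads of all rows while every row is nonempty (fuel bounds the
-- recursion; called with the length of the first row, which suffices since zip
-- stops at the shortest row).
def pyZipStar (fuel : Nat) (rows : List (List (Int × Int))) : List (List (Int × Int)) :=
  match fuel with
  | 0 => []
  | n + 1 =>
    match rows.mapM List.head? with
    | none => []
    | some heads => heads :: pyZipStar n (rows.map List.tail)

def generate_offsets_alt (i : Int) (j : Int) : List (List (Int × Int)) :=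
  let dirs : List (Int × Int) := [(0, 1), (0, -1), (1, 0), (-1, 0), (1, -1), (1, 1), (-1, -1), (-1, 1)]
  let ring0 : List (Int × Int) := List.replicate 8 (i, j)
  let st := (PySem.List.pyRange 0 4 1).foldl
    (fun (st : List (List (Int × Int)) × List (Int × Int)) _ =>
      (st.1 ++ [st.2],
       List.zipWith (fun (p : Int × Int) (d : Int × Int) => (p.1 + d.1, p.2 + d.2)) st.2 dirs))
    ([], ring0)
  let rings := st.1
  (pyZipStar ((rings.headD []).length) rings).map (fun row => row)

-- ===== PRECONDITION & SPEC =====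
def Spec_generate_offsets (i : Int) (j : Int) (out : List (List (Int × Int))) : Prop := out = generate_offsets_alt i j
instance (i : Int) (j : Int) (out : List (List (Int × Int))) : Decidable (Spec_generate_offsets i j out) := by unfold Spec_generate_offsets; infer_instance

-- ===== CLAIM =====
def Claim_equal_generate_offsets : Prop := ∀ (i : Int) (j : Int), Dom_generate_offsets i j → Spec_generate_offsets i j (generate_offsets i j)

-- ===== LEMMAS AND PROOFS =====

-- ===== VERDICT =====
theorem generate_offsets_spec : Claim_equal_generate_offsets := by
  intro i j _
  unfold Spec_generate_offsets generate_offsets generate_offsets_alt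
  simp [PySem.List.pyRange, List.range_succ, pyZipStar, List.replicate, Prod.ext_iff]
  omega
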